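-- pv_equiv track=rewrite | github.com/AtlantixJJ/LinearGAN | lib/misc.py | enumerate_names
-- ===== SOURCE A (Python) =====
-- def enumerate_names(prev=[], i=0, groups=[]):
--   res = []
--   for key in groups[i]:
--     if len(groups[i]) > 1:
--       cur = prev + [key]
--     else:
--       cur = prev
--
--     if i < len(groups) - 1:
--       t = enumerate_names(cur, i + 1, groups)
--       res.extend(t)
--     else:
--       res.append(cur)
--   return res
-- ===== SOURCE B (Python) =====
-- def enumerate_names(prev=[], i=0, groups=[]):
--     partials = [list(prev)]
--     for j in range(i, len(groups)):
--         g = groups[j]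
--         if not g:
--             return []
--         if len(g) > 1:
--             partials = [p + [k] for p in partials for k in g]
--     return partials
-- ===== Notes on version B (the rewrite author's own statement) =====
-- stated objective: alternative
-- what changed: Replaces A's per-key recursion over remaining groups with an iterative left-fold: one pass over the indices range(i, len(groups)) that maintains the list of partial combinations, short-circuiting to [] on an empty group and extending partials by a product comprehension only for groups with more than one element.
-- outside the precondition, e.g. on enumerate_names([], 0, []): A raises IndexError, B returns [[]]
-- crash fix: When len(groups) <= i, A raises IndexError dereferencing groups[i]; B iterates an empty index range and naturally returns [prev]. — e.g. on enumerate_names(["a"], 0, []): A raises IndexError, B returns [["a"]]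
import Mathlib
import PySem

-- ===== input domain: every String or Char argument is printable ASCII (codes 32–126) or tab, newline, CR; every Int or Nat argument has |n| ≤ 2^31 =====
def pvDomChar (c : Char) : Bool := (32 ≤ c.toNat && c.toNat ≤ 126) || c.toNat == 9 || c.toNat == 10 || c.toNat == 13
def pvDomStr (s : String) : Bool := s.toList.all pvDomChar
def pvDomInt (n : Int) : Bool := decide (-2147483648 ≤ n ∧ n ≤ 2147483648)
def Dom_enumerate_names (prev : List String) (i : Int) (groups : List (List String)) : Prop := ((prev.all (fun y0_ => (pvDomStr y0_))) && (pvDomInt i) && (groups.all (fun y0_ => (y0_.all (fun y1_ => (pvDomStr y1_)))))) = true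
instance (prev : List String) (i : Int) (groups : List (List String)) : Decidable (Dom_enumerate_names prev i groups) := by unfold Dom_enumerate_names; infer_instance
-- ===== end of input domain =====

-- B reformulates A's per-key recursion as a single iterative fold over the index range; same values, different decomposition.

-- ===== PORT A =====
-- Literal port of A's recursion: iterate over the keys of groups[i] (Python indexing,
-- negative i wraps), recurse on i+1 while i < len(groups)-1; extend/append becomes flatten.
def enumerate_names (prev : List String) (i : Int) (groups : List (List String)) : List (List String) :=
  let g := (PySem.List.pyGet? groups i).getD []
  (g.map (fun key =>
    let cur := if 1 < g.length then prev ++ [key] else prev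
    if _h : i < (groups.length : Int) - 1 then enumerate_names cur (i + 1) groups
    else [cur])).flatten
termination_by ((groups.length : Int) - i).toNat
decreasing_by omega

-- ===== PORT B =====
-- B's loop 'for j in range(i, len(groups))' with early return [] on an empty group;
-- the comprehension [p + [k] for p in partials for k in g] is the flatMap below.
def enumAltGo (groups : List (List String)) : List Int → List (List String) → List (List String)
  | [], partials => partials
  | j :: js, partials =>
    let g := (PySem.List.pyGet? groups j).getD []
    if g = [] then []
    else if 1 < g.length then
      enumAltGo groups js (partials.flatMap (fun p => g.map (fun k => p ++ [k])))
    else enumAltGo groups js partials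

def enumerate_names_alt (prev : List String) (i : Int) (groups : List (List String)) : List (List String) :=
  enumAltGo groups (PySem.List.pyRange i (groups.length : Int) 1) [prev]

-- ===== PRECONDITION & SPEC =====
-- Pre_ excludes exactly the inputs where A raises IndexError on groups[i] (i ≥ len(groups) or i < -len(groups)).
def Pre_enumerate_names (prev : List String) (i : Int) (groups : List (List String)) : Prop :=
  -(groups.length : Int) ≤ i ∧ i < (groups.length : Int)
instance (prev : List String) (i : Int) (groups : List (List String)) : Decidable (Pre_enumerate_names prev i groups) := by unfold Pre_enumerate_names; infer_instance

def pvWitness_enumerate_names : List String × Int × List (List String) :=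
  (["x"], 0, [["a", "b"], ["c"], ["d", "e"]])

-- When len(groups) <= i, A raises IndexError dereferencing groups[i]; B iterates an empty index range and naturally returns [prev].
def Raises_enumerate_names (prev : List String) (i : Int) (groups : List (List String)) : Prop :=
  (groups.length : Int) ≤ i
instance (prev : List String) (i : Int) (groups : List (List String)) : Decidable (Raises_enumerate_names prev i groups) := by unfold Raises_enumerate_names; infer_instance
def pvRaiseWitness_enumerate_names : List String × Int × List (List String) := (["a"], 0, [])
def pvRaiseWitnessOut_enumerate_names : List (List String) := [["a"]]

def Spec_enumerate_names (prev : List String) (i : Int) (groups : List (List String)) (out : List (List String)) : Prop := out = enumerate_names_alt prev i groups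
instance (prev : List String) (i : Int) (groups : List (List String)) (out : List (List String)) : Decidable (Spec_enumerate_names prev i groups out) := by unfold Spec_enumerate_names; infer_instance

-- ===== CLAIM (what is proved, stated in full; the proofs are below) =====
def Claim_equal_enumerate_names : Prop := ∀ (prev : List String) (i : Int) (groups : List (List String)), Dom_enumerate_names prev i groups → Pre_enumerate_names prev i groups → Spec_enumerate_names prev i groups (enumerate_names prev i groups)

def Claim_raises_enumerate_names : Prop := (∀ (prev : List String) (i : Int) (groups : List (List String)), Dom_enumerate_names prev i groups → Raises_enumerate_names prev i groups → ¬ Pre_enumerate_names prev i groups) ∧ (Dom_enumerate_names (pvRaiseWitness_enumerate_names.1) (pvRaiseWitness_enumerate_names.2.1) (pvRaiseWitness_enumerate_names.2.2) ∧ Raises_enumerate_names (pvRaiseWitness_enumerate_names.1) (pvRaiseWitness_enumerate_names.2.1) (pvRaiseWitness_enumerate_names.2.2) ∧ enumerate_names_alt (pvRaiseWitness_enumerate_names.1) (pvRaiseWitness_enumerate_names.2.1) (pvRaiseWitness_enumerate_names.2.2) = pvRaiseWitnessOut_enumerate_names)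

-- ===== LEMMAS AND PROOFS =====

-- Key invariant: flat-mapping A's recursion from index i over any list of partials
-- equals B's fold over the index range [i, len(groups)).
theorem enum_key (groups : List (List String)) :
    ∀ (m : Nat) (i : Int), -(groups.length : Int) ≤ i → i < (groups.length : Int) →
      ((groups.length : Int) - i).toNat = m →
      ∀ partials : List (List String),
        partials.flatMap (fun p => enumerate_names p i groups)
          = enumAltGo groups (PySem.List.pyRange i (groups.length : Int) 1) partials := by
  intro m
  induction m with
  | zero => intro i h1 h2 h3; omega
  | succ m ih =>
    intro i h1 h2 h3 partials
    rw [PySem.List.pyRange_one_cons h2]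
    have hA : ∀ p : List String, enumerate_names p i groups =
        ((((PySem.List.pyGet? groups i).getD []).map (fun key =>
          if _h : i < (groups.length : Int) - 1 then
            enumerate_names
              (if 1 < ((PySem.List.pyGet? groups i).getD []).length then p ++ [key] else p)
              (i + 1) groups
          else
            [if 1 < ((PySem.List.pyGet? groups i).getD []).length then p ++ [key] else p])).flatten) :=
      fun p => by rw [enumerate_names.eq_def]
    simp only [hA]
    simp only [enumAltGo]
    set g := (PySem.List.pyGet? groups i).getD [] with hg
    by_cases hnil : g = []
    · simp [hnil]
    · rw [if_neg hnil]
      by_cases hlen : 1 < g.length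
      · rw [if_pos hlen]
        simp only [hlen, if_true]
        by_cases hlast : i < (groups.length : Int) - 1
        · simp only [dif_pos hlast]
          rw [← ih (i + 1) (by omega) (by omega) (by omega)
               (partials.flatMap (fun p => g.map (fun k => p ++ [k])))]
          simp only [← List.flatMap_def, List.flatMap_assoc, List.flatMap_map]
        · have : PySem.List.pyRange (i + 1) (groups.length : Int) 1 = [] :=
            PySem.List.pyRange_one_eq_nil (by omega)
          rw [this]
          simp only [dif_neg hlast, enumAltGo]
          simp only [← List.flatMap_def, ← List.map_eq_flatMap]
      · rw [if_neg hlen]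
        have hone : g.length = 1 := by
          have h0 : g.length ≠ 0 := fun h => hnil (List.length_eq_zero_iff.mp h)
          omega
        obtain ⟨k, hk⟩ := List.length_eq_one_iff.mp hone
        simp only [hlen, if_false]
        by_cases hlast : i < (groups.length : Int) - 1
        · simp only [dif_pos hlast]
          rw [← ih (i + 1) (by omega) (by omega) (by omega) partials]
          simp [hk]
        · have : PySem.List.pyRange (i + 1) (groups.length : Int) 1 = [] :=
            PySem.List.pyRange_one_eq_nil (by omega)
          rw [this]
          simp only [dif_neg hlast, enumAltGo]
          simp [hk]

theorem enumerate_names_spec : Claim_equal_enumerate_names := by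
  intro prev i groups _ hpre
  unfold Spec_enumerate_names enumerate_names_alt
  have := enum_key groups ((groups.length : Int) - i).toNat i hpre.1 hpre.2 rfl [prev]
  simpa using this

@[simp]
theorem enumerate_names_raises : Claim_raises_enumerate_names := by
  unfold Claim_raises_enumerate_names
  exact ⟨fun prev i groups _ hr hpre => absurd hpre.2 (not_lt.mpr hr), by decide⟩
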